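-- pv_equiv track=rewrite | github.com/KivenCkl/LeetCode | Problemset/nGK0Fy/nGK0Fy.py | calculate
-- ===== SOURCE A (Python) =====
-- def calculate(s: str) -> int:
--     x, y = 1, 0
--     for c in s:
--         if c == 'A':
--             x = 2 * x + y
--         else:
--             y = 2 * y + x
--     return x + y
-- ===== SOURCE B (Python) =====
-- def calculate(s: str) -> int:
--     # Invariant: each character doubles x + y, starting from 1, so the
--     # result is just 2 ** len(s).
--     return 2 ** len(s)
-- ===== Notes on version B (the rewrite author's own statement) =====
-- stated objective: faster
-- what changed: Replaced the per-character state-machine loop with the closed form 2**len(s), using the invariant that x+y doubles on every character regardless of which branch is taken.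
import Mathlib
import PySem

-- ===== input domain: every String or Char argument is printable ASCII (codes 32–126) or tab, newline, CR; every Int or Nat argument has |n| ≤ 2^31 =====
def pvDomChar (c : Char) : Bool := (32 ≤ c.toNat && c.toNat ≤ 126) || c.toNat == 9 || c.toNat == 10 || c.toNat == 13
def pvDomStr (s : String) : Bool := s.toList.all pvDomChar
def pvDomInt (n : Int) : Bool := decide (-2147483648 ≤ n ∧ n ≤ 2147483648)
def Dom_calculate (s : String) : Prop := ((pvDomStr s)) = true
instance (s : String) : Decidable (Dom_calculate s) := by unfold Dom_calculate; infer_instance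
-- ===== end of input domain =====

-- B replaces A's per-character state loop with the closed form 2^len(s),
-- using the invariant that x+y doubles on every character.


-- ===== PORT A =====
def calculate (s : String) : Int :=
  let p := s.toList.foldl
    (fun (xy : Int × Int) c =>
      if c = 'A' then (2 * xy.1 + xy.2, xy.2) else (xy.1, 2 * xy.2 + xy.1))
    (1, 0)
  p.1 + p.2

-- ===== PORT B =====
def calculate_alt (s : String) : Int := 2 ^ s.toList.length

-- ===== PRECONDITION & SPEC =====
def Spec_calculate (s : String) (out : Int) : Prop := out = calculate_alt s
instance (s : String) (out : Int) : Decidable (Spec_calculate s out) := by unfold Spec_calculate; infer_instance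

-- ===== CLAIM (what is proved, stated in full; the proofs are below) =====
def Claim_equal_calculate : Prop := ∀ (s : String), Dom_calculate s → Spec_calculate s (calculate s)

-- ===== LEMMAS AND PROOFS =====
theorem calc_foldl_sum (l : List Char) : ∀ (x y : Int),
    (l.foldl
      (fun (xy : Int × Int) c =>
        if c = 'A' then (2 * xy.1 + xy.2, xy.2) else (xy.1, 2 * xy.2 + xy.1))
      (x, y)).1 +
    (l.foldl
      (fun (xy : Int × Int) c =>
        if c = 'A' then (2 * xy.1 + xy.2, xy.2) else (xy.1, 2 * xy.2 + xy.1))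
      (x, y)).2 = 2 ^ l.length * (x + y) := by
  induction l with
  | nil => intro x y; simp
  | cons c t ih =>
    intro x y
    simp only [List.foldl_cons, List.length_cons]
    by_cases h : c = 'A' <;> simp only [h, if_pos, if_false] <;>
      rw [ih] <;> ring

-- ===== VERDICT (by name: the statement is the Claim_ definition above) =====
theorem calculate_spec : Claim_equal_calculate := by
  intro s _
  unfold Spec_calculate calculate calculate_alt
  simpa using calc_foldl_sum s.toList 1 0
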